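-- pv_equiv track=rewrite | github.com/grahampicard/advent-of-code-2023 | 3/3.py | gen_coordinates
-- ===== SOURCE A (Python) =====
-- def check_x_y(x, y, xmax, ymax):
--     if (x < 0) | (y < 0) | (x >= xmax) | (y >= ymax):
--         return False
--     else:
--         return True
--
-- def gen_coordinates(row, start, end, row_max, col_max):
--     previous_row, next_row = row - 1, row + 1
--     previous_col, next_col = start - 1, end + 1
--     span = [(row, c) for c in range(start, end)]
--     neighbors = []
--     for row_value in range(previous_row, next_row + 1):
--         for col_value in range(previous_col, next_col + 1):
--             if check_x_y(row_value, col_value, row_max, col_max):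
--                 coord = (row_value, col_value)
--                 if coord not in span:
--                     neighbors.append(coord)
--     return neighbors
-- ===== SOURCE B (Python) =====
-- def gen_coordinates(row, start, end, row_max, col_max):
--     def in_bounds(r, c):
--         return 0 <= r < row_max and 0 <= c < col_max
--     cols = range(start - 1, end + 2)
--     out = [(row - 1, c) for c in cols if in_bounds(row - 1, c)]
--     mid_cols = [start - 1, end, end + 1] if start < end else cols
--     out += [(row, c) for c in mid_cols if in_bounds(row, c)]
--     out += [(row + 1, c) for c in cols if in_bounds(row + 1, c)]
--     return out
-- ===== Notes on version B (the rewrite author's own statement) =====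
-- stated objective: simpler
-- what changed: B drops A's span list and its per-cell membership scan: it emits the top row, then the middle row's three surviving columns (start-1, end, end+1, or the whole range when the span is empty), then the bottom row, region by region in A's exact order.
import Mathlib
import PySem

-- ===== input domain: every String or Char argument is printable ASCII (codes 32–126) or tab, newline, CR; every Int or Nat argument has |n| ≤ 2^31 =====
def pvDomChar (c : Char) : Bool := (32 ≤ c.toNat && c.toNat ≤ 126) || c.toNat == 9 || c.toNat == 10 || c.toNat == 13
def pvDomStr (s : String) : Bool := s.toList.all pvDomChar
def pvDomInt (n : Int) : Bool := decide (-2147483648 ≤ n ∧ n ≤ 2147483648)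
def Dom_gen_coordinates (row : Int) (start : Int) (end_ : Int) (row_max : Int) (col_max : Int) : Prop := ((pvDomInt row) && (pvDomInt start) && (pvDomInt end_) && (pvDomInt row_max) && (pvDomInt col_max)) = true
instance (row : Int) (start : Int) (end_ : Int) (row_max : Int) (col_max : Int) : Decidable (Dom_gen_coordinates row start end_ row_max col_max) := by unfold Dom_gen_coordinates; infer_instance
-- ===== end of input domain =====

-- B drops A's span list and membership scan: it emits the three rows region-by-region
-- (objective: simpler — same output in the same order, no span construction).

-- ===== PORT A =====
def check_x_y (x : Int) (y : Int) (xmax : Int) (ymax : Int) : Bool :=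
  if (decide (x < 0) || decide (y < 0) || decide (x ≥ xmax) || decide (y ≥ ymax)) then false else true

def gen_coordinates (row : Int) (start : Int) (end_ : Int) (row_max : Int) (col_max : Int) : List (Int × Int) :=
  let previous_row := row - 1
  let next_row := row + 1
  let previous_col := start - 1
  let next_col := end_ + 1
  let span := (PySem.List.pyRange start end_ 1).map (fun c => (row, c))
  (PySem.List.pyRange previous_row (next_row + 1) 1).foldl (fun neighbors row_value =>
    (PySem.List.pyRange previous_col (next_col + 1) 1).foldl (fun neighbors col_value =>
      if check_x_y row_value col_value row_max col_max then
        let coord := (row_value, col_value)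
        if coord ∉ span then neighbors ++ [coord] else neighbors
      else neighbors) neighbors) []

-- ===== PORT B =====
def pvInBounds (r : Int) (c : Int) (row_max : Int) (col_max : Int) : Bool :=
  decide (0 ≤ r) && decide (r < row_max) && decide (0 ≤ c) && decide (c < col_max)

def gen_coordinates_alt (row : Int) (start : Int) (end_ : Int) (row_max : Int) (col_max : Int) : List (Int × Int) :=
  let cols := PySem.List.pyRange (start - 1) (end_ + 2) 1
  let out := (cols.filter (fun c => pvInBounds (row - 1) c row_max col_max)).map (fun c => (row - 1, c))
  let mid_cols := if start < end_ then [start - 1, end_, end_ + 1] else cols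
  let out := out ++ (mid_cols.filter (fun c => pvInBounds row c row_max col_max)).map (fun c => (row, c))
  let out := out ++ (cols.filter (fun c => pvInBounds (row + 1) c row_max col_max)).map (fun c => (row + 1, c))
  out

-- ===== PRECONDITION & SPEC =====
def Spec_gen_coordinates (row : Int) (start : Int) (end_ : Int) (row_max : Int) (col_max : Int) (out : List (Int × Int)) : Prop := out = gen_coordinates_alt row start end_ row_max col_max
instance (row : Int) (start : Int) (end_ : Int) (row_max : Int) (col_max : Int) (out : List (Int × Int)) : Decidable (Spec_gen_coordinates row start end_ row_max col_max out) := by unfold Spec_gen_coordinates; infer_instance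

-- ===== CLAIM (what is proved, stated in full; the proofs are below) =====
def Claim_equal_gen_coordinates : Prop := ∀ (row : Int) (start : Int) (end_ : Int) (row_max : Int) (col_max : Int), Dom_gen_coordinates row start end_ row_max col_max → Spec_gen_coordinates row start end_ row_max col_max (gen_coordinates row start end_ row_max col_max)

-- ===== LEMMAS AND PROOFS =====

-- flatten A's nested ifs to a single guard
lemma pv_ite_nest {α : Type} (b1 : Bool) (b2 : Prop) [Decidable b2] (acc : List α) (x : α) :
    (if b1 then (if b2 then acc ++ [x] else acc) else acc)
      = (if b1 && decide b2 then acc ++ [x] else acc) := by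
  by_cases h1 : b1 = true <;> by_cases h2 : b2 <;> simp [h1, h2]

-- membership in A's span
lemma pv_mem_span (row start end_ rv c : Int) :
    ((rv, c) ∈ (PySem.List.pyRange start end_ 1).map (fun c => (row, c)))
      ↔ (rv = row ∧ start ≤ c ∧ c < end_) := by
  simp only [List.mem_map, Prod.mk.injEq, PySem.List.mem_pyRange_one]
  constructor
  · rintro ⟨a, ha, hr, hc⟩; exact ⟨hr.symm, hc ▸ ha⟩
  · rintro ⟨hr, ha⟩; exact ⟨c, ha, hr.symm, rfl⟩

lemma pv_check_eq (x y xmax ymax : Int) : check_x_y x y xmax ymax = pvInBounds x y xmax ymax := by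
  simp only [check_x_y, pvInBounds]
  split_ifs with h
  all_goals simp only [Bool.or_eq_true, decide_eq_true_eq, not_or, not_lt, not_le] at h
  · rw [eq_comm, Bool.and_eq_false_iff]
    simp only [Bool.and_eq_false_iff, decide_eq_false_iff_not, not_lt, not_le]
    omega
  · rw [eq_comm]
    simp only [Bool.and_eq_true, decide_eq_true_eq]
    omega

-- one row of A's scan, for a row index off the span's row
lemma pv_row_off (row start end_ row_max col_max rv : Int) (hrv : rv ≠ row) (init : List (Int × Int)) :
    (PySem.List.pyRange (start - 1) (end_ + 2) 1).foldl (fun neighbors col_value =>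
        if check_x_y rv col_value row_max col_max then
          (if (rv, col_value) ∉ (PySem.List.pyRange start end_ 1).map (fun c => (row, c))
            then neighbors ++ [(rv, col_value)] else neighbors)
        else neighbors) init
      = init ++ ((PySem.List.pyRange (start - 1) (end_ + 2) 1).filter
            (fun c => pvInBounds rv c row_max col_max)).map (fun c => (rv, c)) := by
  simp only [pv_ite_nest, pv_check_eq]
  rw [PySem.List.foldl_append_if (fun c => pvInBounds rv c row_max col_max &&
    decide ((rv, c) ∉ (PySem.List.pyRange start end_ 1).map (fun c => (row, c)))) (fun c => (rv, c))]
  congr 2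
  apply List.filter_congr
  intro c _
  simp [pv_mem_span, hrv]

-- the middle row of A's scan
lemma pv_row_mid (row start end_ row_max col_max : Int) (init : List (Int × Int)) :
    (PySem.List.pyRange (start - 1) (end_ + 2) 1).foldl (fun neighbors col_value =>
        if check_x_y row col_value row_max col_max then
          (if (row, col_value) ∉ (PySem.List.pyRange start end_ 1).map (fun c => (row, c))
            then neighbors ++ [(row, col_value)] else neighbors)
        else neighbors) init
      = init ++ (((if start < end_ then [start - 1, end_, end_ + 1]
              else PySem.List.pyRange (start - 1) (end_ + 2) 1)).filter
            (fun c => pvInBounds row c row_max col_max)).map (fun c => (row, c)) := by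
  simp only [pv_ite_nest, pv_check_eq]
  rw [PySem.List.foldl_append_if (fun c => pvInBounds row c row_max col_max &&
    decide ((row, c) ∉ (PySem.List.pyRange start end_ 1).map (fun c => (row, c)))) (fun c => (row, c))]
  congr 2
  by_cases h : start < end_
  · -- cols = (start-1) :: (span-cols ++ [end_, end_+1]); span-cols filter out
    have hs1' : start - 1 + 1 = start := by ring
    rw [PySem.List.pyRange_one_cons (by omega : start - 1 < end_ + 2), hs1',
        PySem.List.pyRange_one_append start end_ (end_ + 2) (by omega) (by omega)]
    have h2 : PySem.List.pyRange end_ (end_ + 2) 1 = [end_, end_ + 1] := by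
      rw [PySem.List.pyRange_one_cons (by omega : end_ < end_ + 2)]
      rw [show end_ + 2 = (end_ + 1) + 1 by ring, PySem.List.pyRange_one_singleton]
    rw [h2]
    simp only [if_pos h, List.filter_cons, List.filter_append]
    have hmidnil : (PySem.List.pyRange start end_ 1).filter
        (fun c => pvInBounds row c row_max col_max &&
          decide ((row, c) ∉ (PySem.List.pyRange start end_ 1).map (fun c => (row, c)))) = [] := by
      rw [List.filter_eq_nil_iff]
      intro c hc
      rw [PySem.List.mem_pyRange_one] at hc
      simp [pv_mem_span, hc.1, hc.2]
    rw [hmidnil]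
    have e1 : ∀ c : Int, ¬ (start ≤ c ∧ c < end_) →
        (pvInBounds row c row_max col_max &&
          decide ((row, c) ∉ (PySem.List.pyRange start end_ 1).map (fun c => (row, c))))
          = pvInBounds row c row_max col_max := by
      intro c hcc; simp [pv_mem_span, hcc]
    rw [e1 (start - 1) (by omega), e1 end_ (by omega), e1 (end_ + 1) (by omega)]
    by_cases p1 : pvInBounds row (start - 1) row_max col_max <;>
      by_cases p2 : pvInBounds row end_ row_max col_max <;>
        by_cases p3 : pvInBounds row (end_ + 1) row_max col_max <;>
          simp [p1, p2, p3]
  · -- span is empty: the membership guard is vacuous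
    rw [if_neg h]
    apply List.filter_congr
    intro c _
    have : PySem.List.pyRange start end_ 1 = [] := PySem.List.pyRange_one_eq_nil (by omega)
    simp [this]

-- definitional unfoldings of the two ports (the `let`s inlined)
lemma pv_A_unfold (row start end_ row_max col_max : Int) :
    gen_coordinates row start end_ row_max col_max
      = (PySem.List.pyRange (row - 1) (row + 1 + 1) 1).foldl (fun neighbors row_value =>
          (PySem.List.pyRange (start - 1) (end_ + 1 + 1) 1).foldl (fun neighbors col_value =>
            if check_x_y row_value col_value row_max col_max then
              (if (row_value, col_value) ∉ (PySem.List.pyRange start end_ 1).map (fun c => (row, c))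
                then neighbors ++ [(row_value, col_value)] else neighbors)
            else neighbors) neighbors) [] := rfl

lemma pv_B_unfold (row start end_ row_max col_max : Int) :
    gen_coordinates_alt row start end_ row_max col_max
      = ((PySem.List.pyRange (start - 1) (end_ + 2) 1).filter
            (fun c => pvInBounds (row - 1) c row_max col_max)).map (fun c => (row - 1, c))
        ++ (((if start < end_ then [start - 1, end_, end_ + 1]
              else PySem.List.pyRange (start - 1) (end_ + 2) 1)).filter
            (fun c => pvInBounds row c row_max col_max)).map (fun c => (row, c))
        ++ ((PySem.List.pyRange (start - 1) (end_ + 2) 1).filter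
            (fun c => pvInBounds (row + 1) c row_max col_max)).map (fun c => (row + 1, c)) := rfl

-- ===== VERDICT (by name: the statement is the Claim_ definition above) =====
theorem gen_coordinates_spec : Claim_equal_gen_coordinates := by
  intro row start end_ row_max col_max _
  show gen_coordinates row start end_ row_max col_max = gen_coordinates_alt row start end_ row_max col_max
  rw [pv_A_unfold, pv_B_unfold, (by ring : end_ + 1 + 1 = end_ + 2)]
  rw [PySem.List.pyRange_one_cons (by omega : row - 1 < row + 1 + 1),
      PySem.List.pyRange_one_cons (by omega : row - 1 + 1 < row + 1 + 1),
      PySem.List.pyRange_one_cons (by omega : row - 1 + 1 + 1 < row + 1 + 1),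
      PySem.List.pyRange_one_eq_nil (by omega : row + 1 + 1 ≤ row - 1 + 1 + 1 + 1)]
  have e1 : row - 1 + 1 = row := by ring
  simp only [e1, List.foldl_cons, List.foldl_nil]
  rw [pv_row_off row start end_ row_max col_max (row - 1) (by omega),
      pv_row_mid row start end_ row_max col_max,
      pv_row_off row start end_ row_max col_max (row + 1) (by omega)]
  simp [List.append_assoc]
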